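-- pv_equiv track=rewrite | github.com/lganic/genTruth | genTruth.py | invertExpression
-- ===== SOURCE A (Python) =====
-- def invertExpression(exp):
--     #this operation is so fucking strange i had to make a seperate fucking function just for it
--     #this step inverts every single term
--     s=""
--     for a in exp:
--         if not a in "'+()" and not a in s:
--             s+=a
--     nex=""
--     for i in range(len(exp)):
--         if exp[i]!="'":
--             nex+=exp[i]
--         if exp[i] in s:
--             if i==len(exp)-1 or exp[i+1]!="'":
--                 nex+="'"
--     exp=""
--     for i in range(len(nex)-1):
--         exp+=nex[i]
--         if nex[i]!="+" and nex[i+1] in s: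
--             exp+="?"
--     exp+=nex[-1]
--     exp="("+exp+")"
--     exp=exp.replace("+",")(")
--     exp=exp.replace("?","+")
--     return exp
-- ===== SOURCE B (Python) =====
-- def invertExpression(exp):
--     # Tokenize once (toggling each variable's negation), then rebuild with separators.
--     vs = set(exp) - set("'+()")
--     tokens = []
--     i, n = 0, len(exp)
--     while i < n:
--         c = exp[i]
--         if c == "'":
--             i += 1
--         elif c in vs and i + 1 < n and exp[i + 1] == "'":
--             tokens.append(c)
--             i += 2
--         elif c in vs:
--             tokens.append(c + "'")
--             i += 1
--         else:
--             tokens.append(c)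
--             i += 1
--     out = ["("]
--     prev = None
--     for t in tokens:
--         if prev is not None and prev != "+" and t[0] in vs:
--             out.append("+")
--         out.append(")(" if t == "+" else t)
--         prev = t
--     out.append(")")
--     return "".join(out)
-- ===== Notes on version B (the rewrite author's own statement) =====
-- stated objective: alternative
-- what changed: B tokenizes the expression in one pass into negation-toggled tokens and rebuilds the output in a single join with a prev accumulator, instead of A's three character-level passes plus a '?'-sentinel and two string replaces.
-- intended difference: On inputs containing a question-mark character (which A uses internally as its separator sentinel and finally rewrites into plus signs), A corrupts every literal question mark into a plus sign, while B treats it as an ordinary variable and keeps it, which is the intended reading. — e.g. on invertExpression("?"): A returns "(+')", B returns "(?')"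
import Mathlib
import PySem

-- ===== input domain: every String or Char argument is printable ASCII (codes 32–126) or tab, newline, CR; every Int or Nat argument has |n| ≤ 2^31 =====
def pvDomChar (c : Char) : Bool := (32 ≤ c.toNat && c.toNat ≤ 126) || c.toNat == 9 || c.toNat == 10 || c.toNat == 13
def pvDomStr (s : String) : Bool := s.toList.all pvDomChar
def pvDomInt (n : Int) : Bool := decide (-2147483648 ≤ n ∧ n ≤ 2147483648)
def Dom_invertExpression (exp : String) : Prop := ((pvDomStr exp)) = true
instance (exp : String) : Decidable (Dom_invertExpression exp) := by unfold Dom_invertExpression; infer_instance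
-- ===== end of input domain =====

-- B tokenizes the expression once into negation-toggled tokens and rebuilds the output in a single
-- joining pass (alternative decomposition; A makes three character passes plus two replace passes).

-- ===== PORT A =====
-- the character class "'+()" A tests membership in
def pvSpecials : List Char := ['\'', '+', '(', ')']

-- first loop: s collects, in first-seen order, the characters outside "'+()"
def pvBuildS (l : List Char) : List Char :=
  l.foldl (fun s a => if a ∉ pvSpecials ∧ a ∉ s then s ++ [a] else s) []

-- second loop (over i in range(len(exp)), with its exp[i+1] lookahead):
-- `i==len(exp)-1 or exp[i+1]!="'"` is exactly `rest.head? ≠ some '\''`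
def pvToggle (s : List Char) : List Char → List Char
  | [] => []
  | c :: rest =>
      ((if c ≠ '\'' then [c] else []) ++
        (if c ∈ s ∧ rest.head? ≠ some '\'' then ['\''] else [])) ++ pvToggle s rest

-- third loop (over i in range(len(nex)-1), with its nex[i+1] lookahead) plus the trailing
-- `exp += nex[-1]`; on empty nex Python raises IndexError (excluded by Pre_)
def pvSep (s : List Char) : List Char → List Char
  | [] => []
  | [c] => [c]
  | c :: d :: rest => c :: ((if c ≠ '+' ∧ d ∈ s then ['?'] else []) ++ pvSep s (d :: rest))

def invertExpression (exp : String) : String :=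
  let l := exp.toList
  let s := pvBuildS l
  let nex := pvToggle s l
  let e := pvSep s nex
  let w := '(' :: e ++ [')']
  let w := PySem.Chars.replace w ['+'] [')', '(']
  let w := PySem.Chars.replace w ['?'] ['+']
  String.ofList w

-- ===== PORT B =====
-- tokenizer: skip stray apostrophes, toggle each variable's negation, keep other chars
def pvTokenize (vs : List Char) : List Char → List (List Char)
  | [] => []
  | [c] => if c = '\'' then [] else if c ∈ vs then [[c, '\'']] else [[c]]
  | c :: d :: rest =>
      if c = '\'' then pvTokenize vs (d :: rest)
      else if c ∈ vs then
        if d = '\'' then [c] :: pvTokenize vs rest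
        else [c, '\''] :: pvTokenize vs (d :: rest)
      else [c] :: pvTokenize vs (d :: rest)

-- joining pass with the `prev` accumulator; `t.headD ' '` is t[0] (tokens are never empty)
def pvEmit (vs : List Char) : Option (List Char) → List (List Char) → List (List Char)
  | _, [] => []
  | prev, t :: ts =>
      ((if prev.isSome ∧ prev ≠ some ['+'] ∧ t.headD ' ' ∈ vs then [['+']] else []) ++
        [if t = ['+'] then [')', '('] else t]) ++ pvEmit vs (some t) ts

def invertExpression_alt (exp : String) : String :=
  let l := exp.toList
  let vs := PySem.Set.diff (PySem.Set.ofList l) (PySem.Set.ofList ['\'', '+', '(', ')'])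
  let tokens := pvTokenize vs l
  String.ofList (((['('] :: pvEmit vs none tokens) ++ [[')']]).flatten)

-- ===== PRECONDITION & SPEC =====
-- Pre_ excludes exactly the inputs (every character an apostrophe, including "") on which A's
-- `nex[-1]` raises IndexError (B's joining pass returns an empty pair of parentheses there).
def Pre_invertExpression (exp : String) : Prop := exp.toList.any (fun c => c ≠ '\'') = true
instance (exp : String) : Decidable (Pre_invertExpression exp) := by unfold Pre_invertExpression; infer_instance
def pvWitness_invertExpression : String := "ab'+c"

-- On inputs containing a question mark — the sentinel A itself inserts for separators and
-- finally rewrites into plus signs — A corrupts every literal question mark into a plus sign;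
-- B treats it as an ordinary variable and keeps it, which is the intended reading.
def D_invertExpression (exp : String) : Prop := '?' ∈ exp.toList
instance (exp : String) : Decidable (D_invertExpression exp) := by unfold D_invertExpression; infer_instance

def Spec_invertExpression (exp : String) (out : String) : Prop := ¬ D_invertExpression exp → out = invertExpression_alt exp
instance (exp : String) (out : String) : Decidable (Spec_invertExpression exp out) := by unfold Spec_invertExpression; infer_instance

def pvDiffWitness_invertExpression : String := "?"
def pvDiffWitnessOut_invertExpression : String × String := ("(+')", "(?')")

-- ===== CLAIM (what is proved, stated in full; the proofs are below) =====
def Claim_unchanged_invertExpression : Prop := ∀ (exp : String), Dom_invertExpression exp → Pre_invertExpression exp → Spec_invertExpression exp (invertExpression exp)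
def Claim_changed_invertExpression : Prop := Dom_invertExpression (pvDiffWitness_invertExpression) ∧ Pre_invertExpression (pvDiffWitness_invertExpression) ∧ D_invertExpression (pvDiffWitness_invertExpression) ∧ invertExpression (pvDiffWitness_invertExpression) = pvDiffWitnessOut_invertExpression.1 ∧ invertExpression_alt (pvDiffWitness_invertExpression) = pvDiffWitnessOut_invertExpression.2 ∧ pvDiffWitnessOut_invertExpression.1 ≠ pvDiffWitnessOut_invertExpression.2
def Claim_exact_invertExpression : Prop := ∀ (exp : String), Dom_invertExpression exp → Pre_invertExpression exp → D_invertExpression exp → invertExpression exp ≠ invertExpression_alt exp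
-- ===== LEMMAS AND PROOFS =====

theorem pvReplaceGo_single (a : Char) (new : List Char) :
    ∀ (fuel : Nat) (l acc : List Char), l.length ≤ fuel →
      PySem.Chars.replace.go [a] new fuel l acc
        = acc.reverse ++ l.flatMap (fun c => if c = a then new else [c]) := by
  intro fuel
  induction fuel with
  | zero =>
    intro l acc h
    have : l = [] := List.eq_nil_of_length_eq_zero (Nat.le_zero.mp h)
    subst this
    simp [PySem.Chars.replace.go]
  | succ n ih =>
    intro l acc h
    cases l with
    | nil => simp [PySem.Chars.replace.go]
    | cons c t =>
      have hlen : t.length ≤ n := by simpa using h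
      by_cases hc : c = a
      · subst hc
        rw [show PySem.Chars.replace.go [c] new (n+1) (c :: t) acc
              = PySem.Chars.replace.go [c] new n (List.drop 1 (c :: t)) (new.reverse ++ acc) from by
            simp [PySem.Chars.replace.go, List.isPrefixOf]]
        rw [ih _ _ (by simpa using hlen)]
        simp
      · rw [show PySem.Chars.replace.go [a] new (n+1) (c :: t) acc
              = PySem.Chars.replace.go [a] new n t (c :: acc) from by
            have : ([a].isPrefixOf (c :: t)) = false := by
              simp [List.isPrefixOf]; exact fun h => (hc h.symm).elim
            simp [PySem.Chars.replace.go, this]]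
        rw [ih _ _ hlen]
        simp [hc]
theorem pvReplace_single (a : Char) (new l : List Char) :
    PySem.Chars.replace l [a] new = l.flatMap (fun c => if c = a then new else [c]) := by
  rw [PySem.Chars.replace]
  simp
  exact pvReplaceGo_single a new l.length l [] (le_refl _)

theorem pvMem_buildS (l : List Char) (c : Char) :
    c ∈ pvBuildS l ↔ c ∈ l ∧ c ∉ pvSpecials := by
  have main : ∀ (l acc : List Char),
      c ∈ l.foldl (fun s a => if a ∉ pvSpecials ∧ a ∉ s then s ++ [a] else s) acc
        ↔ c ∈ acc ∨ (c ∈ l ∧ c ∉ pvSpecials) := by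
    intro l
    induction l with
    | nil => simp
    | cons a t ih =>
      intro acc
      simp only [List.foldl_cons, ih]
      by_cases hsp : a ∈ pvSpecials
      · simp [hsp]
        constructor
        · rintro (h | h) <;> try (left; exact h)
          right; exact ⟨Or.inr h.1, h.2⟩
        · rintro (h | ⟨(rfl | h), hn⟩)
          · left; exact h
          · exact absurd hsp hn
          · right; exact ⟨h, hn⟩
      · by_cases ha : a ∈ acc
        · simp [hsp, ha]
          constructor
          · rintro (h | h)
            · left; exact h
            · right; exact ⟨Or.inr h.1, h.2⟩
          · rintro (h | ⟨(rfl | h), hn⟩)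
            · left; exact h
            · left; exact ha
            · right; exact ⟨h, hn⟩
        · simp [hsp, ha, List.mem_append]
          constructor
          · rintro ((h | rfl) | h)
            · left; exact h
            · right; exact ⟨Or.inl rfl, hsp⟩
            · right; exact ⟨Or.inr h.1, h.2⟩
          · rintro (h | ⟨(rfl | h), hn⟩)
            · left; left; exact h
            · left; right; rfl
            · right; exact ⟨h, hn⟩
  rw [pvBuildS, main]
  simp

theorem pvMem_vs (l : List Char) (c : Char) :
    c ∈ PySem.Set.diff (PySem.Set.ofList l) (PySem.Set.ofList ['\'', '+', '(', ')'])
      ↔ c ∈ l ∧ c ∉ pvSpecials := by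
  simp [PySem.Set.diff, List.mem_filter, pysem, pvSpecials]
theorem pvToggle_cons (s : List Char) (c : Char) (rest : List Char) :
    pvToggle s (c :: rest)
      = ((if c ≠ '\'' then [c] else []) ++
          (if c ∈ s ∧ rest.head? ≠ some '\'' then ['\''] else [])) ++ pvToggle s rest := rfl

theorem pvToggle_eq_flatten (s vs : List Char) (hmem : ∀ c, c ∈ s ↔ c ∈ vs)
    (h' : '\'' ∉ s) : ∀ l, pvToggle s l = (pvTokenize vs l).flatten := by
  intro l
  induction l using pvTokenize.induct vs with
  | case1 => simp [pvToggle, pvTokenize]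
  | case2 => rw [pvToggle_cons]; simp [pvToggle, pvTokenize, h']
  | case3 c hc hv =>
    rw [pvToggle_cons]; simp [pvToggle, pvTokenize, hc, hv, (hmem c).mpr hv]
  | case4 c hc hv =>
    have hs : c ∉ s := fun h => hv ((hmem c).mp h)
    rw [pvToggle_cons]; simp [pvToggle, pvTokenize, hc, hv, hs]
  | case5 d rest ih => rw [pvToggle_cons]; simp [pvTokenize, h', ih]
  | case6 c rest hc hv ih =>
    rw [pvToggle_cons, pvToggle_cons]
    simp [pvTokenize, hc, hv, (hmem c).mpr hv, h', ih]
  | case7 c d rest hc hv hd ih =>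
    rw [pvToggle_cons]
    simp [pvTokenize, hc, hv, hd, (hmem c).mpr hv, ih]
  | case8 c d rest hc hv ih =>
    have hs : c ∉ s := fun h => hv ((hmem c).mp h)
    rw [pvToggle_cons]
    simp [pvTokenize, hc, hv, hs, ih]
def pvTokWF (s : List Char) (t : List Char) : Prop :=
  (∃ c, c ∈ s ∧ c ≠ '?' ∧ (t = [c] ∨ t = [c, '\''])) ∨
  (∃ c, c ∉ s ∧ c ≠ '\'' ∧ c ≠ '?' ∧ t = [c])

theorem pvTokens_wf (s vs : List Char) (hmem : ∀ c, c ∈ s ↔ c ∈ vs) :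
    ∀ l, (∀ c ∈ l, c ≠ '?') → ∀ t ∈ pvTokenize vs l, pvTokWF s t := by
  intro l
  induction l using pvTokenize.induct vs with
  | case1 => simp [pvTokenize]
  | case2 => simp [pvTokenize]
  | case3 c hc hv =>
    intro hq t ht
    simp [pvTokenize, hc, hv] at ht
    subst ht
    exact Or.inl ⟨c, (hmem c).mpr hv, hq c (by simp), Or.inr rfl⟩
  | case4 c hc hv =>
    intro hq t ht
    simp [pvTokenize, hc, hv] at ht
    subst ht
    exact Or.inr ⟨c, fun h => hv ((hmem c).mp h), hc, hq c (by simp), rfl⟩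
  | case5 d rest ih =>
    intro hq t ht
    simp only [pvTokenize] at ht
    exact ih (fun c hcm => hq c (List.mem_cons_of_mem _ hcm)) t ht
  | case6 c rest hc hv ih =>
    intro hq t ht
    simp only [pvTokenize, if_neg hc, if_pos hv] at ht
    rcases List.mem_cons.mp ht with rfl | ht
    · exact Or.inl ⟨c, (hmem c).mpr hv, hq c (by simp), Or.inl rfl⟩
    · exact ih (fun x hx => hq x (by simp [hx])) t ht
  | case7 c d rest hc hv hd ih =>
    intro hq t ht
    simp only [pvTokenize, if_neg hc, if_pos hv, if_neg hd] at ht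
    rcases List.mem_cons.mp ht with rfl | ht
    · exact Or.inl ⟨c, (hmem c).mpr hv, hq c (by simp), Or.inr rfl⟩
    · exact ih (fun x hx => hq x (by simp [hx])) t ht
  | case8 c d rest hc hv ih =>
    intro hq t ht
    simp only [pvTokenize, if_neg hc, if_neg hv] at ht
    rcases List.mem_cons.mp ht with rfl | ht
    · exact Or.inr ⟨c, fun h => hv ((hmem c).mp h), hc, hq c (by simp), rfl⟩
    · exact ih (fun x hx => hq x (by simp [hx])) t ht

theorem pvTokenize_ne_nil (vs : List Char) :
    ∀ l, (∃ c ∈ l, c ≠ '\'') → pvTokenize vs l ≠ [] := by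
  intro l
  induction l using pvTokenize.induct vs with
  | case1 => simp
  | case2 => simp [pvTokenize]
  | case3 c hc hv => simp [pvTokenize, hc, hv]
  | case4 c hc hv => simp [pvTokenize, hc, hv]
  | case5 d rest ih =>
    intro h
    simp only [pvTokenize]
    apply ih
    rcases h with ⟨c, hcm, hcn⟩
    rcases List.mem_cons.mp hcm with rfl | h2
    · exact absurd rfl hcn
    · exact ⟨c, h2, hcn⟩
  | case6 c rest hc hv ih => simp [pvTokenize, hc, hv]
  | case7 c d rest hc hv hd ih => simp [pvTokenize, hc, hv, hd]
  | case8 c d rest hc hv ih => simp [pvTokenize, hc, hv]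
def pvFG (x : List Char) : List Char :=
  (x.flatMap (fun c => if c = '+' then [')', '('] else [c])).flatMap
    (fun c => if c = '?' then ['+'] else [c])

theorem pvSep_cons (s : List Char) (c d : Char) (rest : List Char) :
    pvSep s (c :: d :: rest)
      = c :: ((if c ≠ '+' ∧ d ∈ s then ['?'] else []) ++ pvSep s (d :: rest)) := rfl

theorem pvSep_emit (s vs : List Char) (hmem : ∀ c, c ∈ s ↔ c ∈ vs)
    (h' : '\'' ∉ s) (hplus : '+' ∉ s) :
    ∀ ts t, pvTokWF s t → (∀ u ∈ ts, pvTokWF s u) →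
      pvFG (pvSep s (t ++ ts.flatten))
        = (if t = ['+'] then [')', '('] else t) ++ (pvEmit vs (some t) ts).flatten := by
  intro ts
  induction ts with
  | nil =>
    intro t hwf _
    rcases hwf with ⟨c, hcs, hcq, rfl | rfl⟩ | ⟨c, hcs, hcn, hcq, rfl⟩
    · have hcp : c ≠ '+' := fun h => hplus (h ▸ hcs)
      simp [pvSep, pvEmit, pvFG, hcp, hcq]
    · have hcp : c ≠ '+' := fun h => hplus (h ▸ hcs)
      simp [pvSep, pvSep_cons, pvEmit, pvFG, hcp, hcq, h']
    · by_cases hcp : c = '+'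
      · subst hcp; simp [pvSep, pvEmit, pvFG]
      · simp [pvSep, pvEmit, pvFG, hcp, hcq]
  | cons u ts' ih =>
    intro t hwf hall
    have hwfu : pvTokWF s u := hall u (by simp)
    have hall' : ∀ w ∈ ts', pvTokWF s w := fun w hw => hall w (by simp [hw])
    have ihu := ih u hwfu hall'
    obtain ⟨d, utail, rfl⟩ : ∃ d utail, u = d :: utail := by
      rcases hwfu with ⟨d, _, _, rfl | rfl⟩ | ⟨d, _, _, _, rfl⟩ <;> exact ⟨d, _, rfl⟩
    have hdvs : d ∈ vs ↔ d ∈ s := (hmem d).symm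
    rcases hwf with ⟨c, hcs, hcq, rfl | rfl⟩ | ⟨c, hcs, hcn, hcq, rfl⟩
    · have hcp : c ≠ '+' := fun h => hplus (h ▸ hcs)
      by_cases hd : d ∈ s
      · simp only [List.cons_append, List.nil_append, List.flatten_cons, pvSep_cons,
          pvFG] at ihu ⊢
        simp [pvEmit, hcp, hcq, hd, hdvs.mpr hd, ihu]
      · simp only [List.cons_append, List.nil_append, List.flatten_cons, pvSep_cons,
          pvFG] at ihu ⊢
        have hdv : d ∉ vs := fun h => hd (hdvs.mp h)
        simp [pvEmit, hcp, hcq, hd, hdv, ihu]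
    · have hcp : c ≠ '+' := fun h => hplus (h ▸ hcs)
      by_cases hd : d ∈ s
      · simp only [List.cons_append, List.nil_append, List.flatten_cons, pvSep_cons,
          pvFG] at ihu ⊢
        simp [pvEmit, hcp, hcq, hd, h', hdvs.mpr hd, ihu]
      · simp only [List.cons_append, List.nil_append, List.flatten_cons, pvSep_cons,
          pvFG] at ihu ⊢
        have hdv : d ∉ vs := fun h => hd (hdvs.mp h)
        simp [pvEmit, hcp, hcq, hd, h', hdv, ihu]
    · by_cases hcp : c = '+'
      · subst hcp
        by_cases hd : d ∈ s
        · simp only [List.cons_append, List.nil_append, List.flatten_cons, pvSep_cons,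
            pvFG] at ihu ⊢
          simp [pvEmit, hd, hdvs.mpr hd, ihu]
        · simp only [List.cons_append, List.nil_append, List.flatten_cons, pvSep_cons,
            pvFG] at ihu ⊢
          have hdv : d ∉ vs := fun h => hd (hdvs.mp h)
          simp [pvEmit, hd, hdv, ihu]
      · by_cases hd : d ∈ s
        · simp only [List.cons_append, List.nil_append, List.flatten_cons, pvSep_cons,
            pvFG] at ihu ⊢
          simp [pvEmit, hcp, hcq, hd, hdvs.mpr hd, ihu]
        · simp only [List.cons_append, List.nil_append, List.flatten_cons, pvSep_cons,
            pvFG] at ihu ⊢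
          have hdv : d ∉ vs := fun h => hd (hdvs.mp h)
          simp [pvEmit, hcp, hcq, hd, hdv, ihu]
theorem pvToggle_mem (s : List Char) (c : Char) (hc : c ≠ '\'') :
    ∀ l, c ∈ l → c ∈ pvToggle s l := by
  intro l
  induction l with
  | nil => simp
  | cons a rest ih =>
    intro hm
    rw [pvToggle_cons]
    rcases List.mem_cons.mp hm with rfl | h
    · simp [hc]
    · simp [ih h]

theorem pvEmit_mem (vs : List Char) :
    ∀ (ts : List (List Char)) (prev : Option (List Char)) (t : List Char),
      t ∈ ts → '?' ∈ t → '?' ∈ (pvEmit vs prev ts).flatten := by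
  intro ts
  induction ts with
  | nil => simp
  | cons u ts' ih =>
    intro prev t ht hq
    rcases List.mem_cons.mp ht with rfl | h
    · have : t ≠ ['+'] := by rintro rfl; simp at hq
      simp [pvEmit, this, hq]
    · have := ih (some u) t h hq
      rcases List.mem_flatten.mp this with ⟨x, hx1, hx2⟩
      simp only [pvEmit, List.flatten_append, List.mem_append]
      exact Or.inr (List.mem_flatten.mpr ⟨x, hx1, hx2⟩)

theorem pvNoQ_flatMapG (x : List Char) :
    '?' ∉ x.flatMap (fun c => if c = '?' then ['+'] else [c]) := by
  intro h
  rcases List.mem_flatMap.mp h with ⟨c, _, hm⟩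
  by_cases hc : c = '?' <;> simp [hc] at hm
  exact hc hm.symm
theorem pvMain (exp : String) (hpre : Pre_invertExpression exp)
    (hd : ¬ D_invertExpression exp) : invertExpression exp = invertExpression_alt exp := by
  unfold Pre_invertExpression at hpre
  unfold D_invertExpression at hd
  set l := exp.toList with hl
  set s := pvBuildS l with hs
  set vs := PySem.Set.diff (PySem.Set.ofList l) (PySem.Set.ofList ['\'', '+', '(', ')']) with hvs
  have hmem : ∀ c, c ∈ s ↔ c ∈ vs := by
    intro c; rw [hs, hvs, pvMem_buildS, pvMem_vs]
  have h' : '\'' ∉ s := fun h => ((pvMem_buildS l '\'').mp h).2 (by simp [pvSpecials])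
  have hplus : '+' ∉ s := fun h => ((pvMem_buildS l '+').mp h).2 (by simp [pvSpecials])
  have hq : ∀ c ∈ l, c ≠ '?' := fun c hc e => hd (e ▸ hc)
  have hex : ∃ c ∈ l, c ≠ '\'' := by simpa using hpre
  have hne := pvTokenize_ne_nil vs l hex
  have hwf := pvTokens_wf s vs hmem l hq
  have htog := pvToggle_eq_flatten s vs hmem h' l
  obtain ⟨t, ts, hts⟩ : ∃ t ts, pvTokenize vs l = t :: ts := by
    cases h : pvTokenize vs l with
    | nil => exact absurd h hne
    | cons a b => exact ⟨a, b, rfl⟩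
  have hwft : pvTokWF s t := hwf t (by rw [hts]; simp)
  have hwfts : ∀ u ∈ ts, pvTokWF s u := fun u hu => hwf u (by rw [hts]; simp [hu])
  have hsep := pvSep_emit s vs hmem h' hplus ts t hwft hwfts
  show invertExpression exp = invertExpression_alt exp
  rw [invertExpression, invertExpression_alt]
  simp only [← hl, ← hs, ← hvs, hts]
  rw [pvReplace_single, pvReplace_single]
  congr 1
  rw [htog, hts]
  simp only [List.flatten_cons]
  have hA : (('(' :: pvSep s (t ++ ts.flatten) ++ [')']).flatMap
        (fun c => if c = '+' then [')', '('] else [c])).flatMap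
        (fun c => if c = '?' then ['+'] else [c])
      = '(' :: pvFG (pvSep s (t ++ ts.flatten)) ++ [')'] := by
    simp [pvFG, List.flatMap_append]
  rw [hA, hsep]
  simp [pvEmit]


-- ===== VERDICT (by name: the statement is the Claim_ definition above) =====
theorem invertExpression_spec : Claim_unchanged_invertExpression := by
  intro exp _ hpre hd
  exact pvMain exp hpre hd

set_option maxRecDepth 10000 in
theorem invertExpression_changed : Claim_changed_invertExpression := by
  unfold Claim_changed_invertExpression; decide

theorem invertExpression_tight : Claim_exact_invertExpression := by
  intro exp _ _ hdq heq
  unfold D_invertExpression at hdq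
  have htl := congrArg String.toList heq
  set l := exp.toList with hl
  set s := pvBuildS l with hs
  set vs := PySem.Set.diff (PySem.Set.ofList l) (PySem.Set.ofList ['\'', '+', '(', ')']) with hvs
  have hmem : ∀ c, c ∈ s ↔ c ∈ vs := by
    intro c; rw [hs, hvs, pvMem_buildS, pvMem_vs]
  have h' : '\'' ∉ s := fun h => ((pvMem_buildS l '\'').mp h).2 (by simp [pvSpecials])
  -- the left side never contains '?'
  have hA : (invertExpression exp).toList
      = ((PySem.Chars.replace ('(' :: pvSep s (pvToggle s l) ++ [')']) ['+'] [')', '(']).flatMap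
          (fun c => if c = '?' then ['+'] else [c])) := by
    rw [invertExpression]
    simp only [← hl, ← hs]
    rw [pvReplace_single '?']
    exact String.toList_ofList
  have hAq : '?' ∉ (invertExpression exp).toList := by
    rw [hA]; exact pvNoQ_flatMapG _
  -- the right side does contain '?'
  have hBq : '?' ∈ (invertExpression_alt exp).toList := by
    have h1 : '?' ∈ pvToggle s l := pvToggle_mem s '?' (by decide) l hdq
    rw [pvToggle_eq_flatten s vs hmem h' l] at h1
    rcases List.mem_flatten.mp h1 with ⟨t, ht, hqt⟩
    have h2 := pvEmit_mem vs (pvTokenize vs l) none t ht hqt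
    rw [invertExpression_alt]
    simp only [← hl, ← hvs]
    rw [String.toList_ofList]
    simp [h2]
  rw [htl] at hAq
  exact hAq hBq
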